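-- pv_equiv track=rewrite | github.com/mike114b/Segdesign_v3 | hmmer/hmmer.py | get_sequence_context
-- ===== SOURCE A (Python) =====
-- def get_sequence_context(sequence, center_pos, window=5):
--     """
--     获取序列上下文
--
--     参数:
--         sequence (str): 查询序列
--         center_pos (int): 中心位置（0-based）
--         window (int): 每侧取多少个氨基酸
--
--     返回:
--         str: 序列上下文
--     """
--     n = len(sequence)
--     start = max(0, center_pos - window)
--     end = min(n, center_pos + window + 1)
--
--     context = []
--     for i in range(start, end):
--         if i == center_pos:
--             context.append(f"[{sequence[i]}]")  # 标记中心位置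
--         else:
--             context.append(sequence[i])
--
--     return "".join(context)
-- ===== SOURCE B (Python) =====
-- def get_sequence_context(sequence, center_pos, window=5):
--     n = len(sequence)
--     start = max(0, center_pos - window)
--     end = min(n, center_pos + window + 1)
--     if end <= start:
--         return ""
--     substring = sequence[start:end]
--     if start <= center_pos < end:
--         idx = center_pos - start
--         return substring[:idx] + "[" + substring[idx] + "]" + substring[idx + 1:]
--     return substring
-- ===== Notes on version B (the rewrite author's own statement) =====
-- stated objective: simpler
-- what changed: B replaces A's per-index loop that appends (possibly bracketed) characters with a single slice of the window plus one splice inserting the brackets when the center lies inside it.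
import Mathlib
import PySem

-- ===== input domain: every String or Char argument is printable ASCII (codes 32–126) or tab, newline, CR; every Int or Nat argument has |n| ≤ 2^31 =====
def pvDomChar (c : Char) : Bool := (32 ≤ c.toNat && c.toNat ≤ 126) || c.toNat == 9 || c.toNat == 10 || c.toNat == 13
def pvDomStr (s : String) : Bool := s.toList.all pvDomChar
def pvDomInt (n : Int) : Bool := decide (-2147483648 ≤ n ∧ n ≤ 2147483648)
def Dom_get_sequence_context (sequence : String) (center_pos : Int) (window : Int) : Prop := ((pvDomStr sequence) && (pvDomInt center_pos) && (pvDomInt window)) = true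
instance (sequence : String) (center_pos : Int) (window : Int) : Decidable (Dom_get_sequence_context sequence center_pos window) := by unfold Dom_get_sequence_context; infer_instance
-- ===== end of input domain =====

-- B replaces A's char-by-char marking loop with one slice plus a splice; objective: simpler. Both are total.

-- ===== PORT A =====
-- Literal port of A: loop i over range(start, end), appending "[c]" at the
-- center position and the bare character elsewhere, then join.
-- sequence[i] is ported as pyGetD with a dummy default: every i produced by the
-- range satisfies 0 ≤ i < len(sequence), so Python never raises there.
def get_sequence_context (sequence : String) (center_pos : Int) (window : Int) : String :=
  let s := sequence.toList
  let n : Int := PySem.Chars.len s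
  let start := max 0 (center_pos - window)
  let stop := min n (center_pos + window + 1)
  let context := (PySem.List.pyRange start stop 1).foldl (fun acc i =>
    if i = center_pos then
      acc ++ ('[' :: PySem.List.pyGetD s i ' ' :: [']'])
    else
      acc ++ [PySem.List.pyGetD s i ' ']) ([] : List Char)
  String.ofList context

-- ===== PORT B =====
-- Literal port of Source B: slice the window once; if the center lies inside it,
-- splice "[" and "]" around the character at idx = center_pos - start.
def get_sequence_context_alt (sequence : String) (center_pos : Int) (window : Int) : String :=
  let s := sequence.toList
  let n : Int := PySem.Chars.len s
  let start := max 0 (center_pos - window)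
  let stop := min n (center_pos + window + 1)
  if stop ≤ start then "" else
  let sub := PySem.List.slice s (some start) (some stop)
  if start ≤ center_pos ∧ center_pos < stop then
    let idx := center_pos - start
    String.ofList (PySem.List.slice sub none (some idx)
      ++ '[' :: PySem.List.pyGetD sub idx ' ' :: [']']
      ++ PySem.List.slice sub (some (idx + 1)) none)
  else
    String.ofList sub

-- ===== PRECONDITION & SPEC =====
def Spec_get_sequence_context (sequence : String) (center_pos : Int) (window : Int) (out : String) : Prop := out = get_sequence_context_alt sequence center_pos window
instance (sequence : String) (center_pos : Int) (window : Int) (out : String) : Decidable (Spec_get_sequence_context sequence center_pos window out) := by unfold Spec_get_sequence_context; infer_instance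

-- ===== CLAIM (what is proved, stated in full; the proofs are below) =====
def Claim_equal_get_sequence_context : Prop := ∀ (sequence : String) (center_pos : Int) (window : Int), Dom_get_sequence_context sequence center_pos window → Spec_get_sequence_context sequence center_pos window (get_sequence_context sequence center_pos window)

-- ===== LEMMAS AND PROOFS =====

-- A's loop body with the branch pulled inside the append.
theorem pvFoldBody (s : List Char) (c : Int) :
    (fun (acc : List Char) (i : Int) =>
      if i = c then acc ++ ('[' :: PySem.List.pyGetD s i ' ' :: [']'])
      else acc ++ [PySem.List.pyGetD s i ' '])
    = (fun acc i => acc ++ (if i = c then ('[' :: PySem.List.pyGetD s i ' ' :: [']']) else [PySem.List.pyGetD s i ' '])) := by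
  funext acc i; split <;> rfl

-- Reading s over an in-bounds integer range is a take-then-drop of s.
theorem pvMapRange (s : List Char) (a b : Int) (ha : 0 ≤ a) (hb : b ≤ (s.length : Int)) :
    (PySem.List.pyRange a b 1).map (fun i => PySem.List.pyGetD s i ' ')
      = (s.take b.toNat).drop a.toNat := by
  apply List.ext_getElem?
  intro k
  rcases lt_or_ge (k : Int) (b - a) with hk | hk
  · have hkb : a + k < b := by omega
    have hkn : a.toNat + k < s.length := by omega
    have hlen : k < ((PySem.List.pyRange a b 1).map (fun i => PySem.List.pyGetD s i ' ')).length := by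
      rw [List.length_map, PySem.List.length_pyRange_one]; omega
    have hlen2 : k < ((s.take b.toNat).drop a.toNat).length := by
      simp [List.length_drop, List.length_take]; omega
    rw [List.getElem?_eq_getElem hlen, List.getElem?_eq_getElem hlen2]
    have h1 : (PySem.List.pyRange a b 1)[k]'(by rw [PySem.List.length_pyRange_one]; omega) = a + k :=
      PySem.List.getElem_pyRange_one a b k _
    simp only [List.getElem_map, h1]
    rw [PySem.List.pyGetD_eq_getElem s ' ' (by omega) (by omega)]
    have h2 : (List.drop a.toNat (List.take b.toNat s))[k]'hlen2 = s[a.toNat + k]'hkn := by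
      rw [List.getElem_drop, List.getElem_take]
    have h3 : (a + (k : Int)).toNat = a.toNat + k := by omega
    simp [h2, h3]
  · have hlen : ((PySem.List.pyRange a b 1).map (fun i => PySem.List.pyGetD s i ' ')).length ≤ k := by
      rw [List.length_map, PySem.List.length_pyRange_one]; omega
    have hlen2 : ((s.take b.toNat).drop a.toNat).length ≤ k := by
      simp [List.length_drop, List.length_take]; omega
    rw [List.getElem?_eq_none hlen, List.getElem?_eq_none hlen2]

-- flatMap of singletons is a map (used where the range avoids the center).
theorem pvFlatMapSingleton {α β : Type} (g : α → List β) (f : α → β) (l : List α)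
    (h : ∀ i ∈ l, g i = [f i]) : l.flatMap g = l.map f := by
  induction l with
  | nil => rfl
  | cons x xs ih =>
    simp only [List.flatMap_cons, List.map_cons, h x (by simp),
      ih (fun i hi => h i (by simp [hi]))]
    rfl

theorem get_sequence_context_spec : Claim_equal_get_sequence_context := by
  intro sequence c w _
  unfold Spec_get_sequence_context get_sequence_context get_sequence_context_alt
  simp only [PySem.Chars.len_eq]
  set s := sequence.toList with hs
  set n : Int := (s.length : Int) with hn
  set a : Int := max 0 (c - w) with hA
  set b : Int := min n (c + w + 1) with hB
  have ha : 0 ≤ a := by omega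
  have hbn : b ≤ n := by omega
  rw [pvFoldBody, PySem.List.foldl_append_eq_flatMap, List.nil_append]
  by_cases hba : b ≤ a
  · rw [if_pos hba, PySem.List.pyRange_one_eq_nil hba]
    rfl
  · rw [if_neg hba]
    have hab : a < b := by omega
    have hb0 : 0 ≤ b := by omega
    by_cases hc : a ≤ c ∧ c < b
    · rw [if_pos hc]
      obtain ⟨hc1, hc2⟩ := hc
      have hcn : c < n := by omega
      -- split the range at the center
      rw [PySem.List.pyRange_one_append a c b hc1 (by omega),
          PySem.List.pyRange_one_cons hc2]
      rw [List.flatMap_append, List.flatMap_cons]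
      rw [if_pos rfl]
      rw [pvFlatMapSingleton _ (fun i => PySem.List.pyGetD s i ' ') _
            (fun i hi => by
              rw [PySem.List.mem_pyRange_one] at hi
              rw [if_neg (by omega)]),
          pvFlatMapSingleton _ (fun i => PySem.List.pyGetD s i ' ') _
            (fun i hi => by
              rw [PySem.List.mem_pyRange_one] at hi
              rw [if_neg (by omega)])]
      rw [pvMapRange s a c ha (by omega), pvMapRange s (c + 1) b (by omega) hbn]
      -- B's pieces
      rw [PySem.List.slice_toNat s ha hb0]
      have hsublen : (List.take (b.toNat - a.toNat) (List.drop a.toNat s)).length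
          = b.toNat - a.toNat := by
        simp [List.length_take, List.length_drop]; omega
      rw [PySem.List.slice_to _ (by omega : (0:Int) ≤ c - a),
          PySem.List.slice_from _ (by omega : (0:Int) ≤ c - a + 1)]
      rw [PySem.List.pyGetD_eq_getElem s ' ' (by omega) (by omega),
          PySem.List.pyGetD_eq_getElem _ ' ' (by omega)
            (by rw [hsublen]; omega)]
      -- the three pieces of the splice agree with the three pieces of the loop
      have e1 : List.take (c - a).toNat (List.take (b.toNat - a.toNat) (List.drop a.toNat s))
          = List.drop a.toNat (List.take c.toNat s) := by
        rw [List.take_take, Nat.min_eq_left (by omega), List.drop_take]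
        congr 1
        omega
      have e2 : (List.take (b.toNat - a.toNat) (List.drop a.toNat s))[(c - a).toNat]'
            (by rw [hsublen]; omega) = s[c.toNat]'(by omega) := by
        rw [List.getElem_take, List.getElem_drop]
        congr 1
        omega
      have e3 : List.drop (c + 1).toNat (List.take b.toNat s)
          = List.drop (c - a + 1).toNat (List.take (b.toNat - a.toNat) (List.drop a.toNat s)) := by
        rw [List.drop_take, List.drop_take, List.drop_drop]
        congr 1
        · omega
        · congr 1
          omega
      rw [e2, e1, ← e3]
      simp [List.append_assoc]
    · rw [if_neg hc]
      rw [pvFlatMapSingleton _ (fun i => PySem.List.pyGetD s i ' ') _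
            (fun i hi => by
              rw [PySem.List.mem_pyRange_one] at hi
              rw [if_neg (by omega)]),
          pvMapRange s a b ha hbn,
          PySem.List.slice_toNat s ha hb0,
          List.drop_take]
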